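-- pv_equiv track=rewrite | github.com/bragon9/leetcode | 1813SentenceSimilarityIII.py | areSentencesSimilar
-- ===== SOURCE A (Python) =====
-- def areSentencesSimilar(sentence1: str, sentence2: str) -> bool:
--     def check_front(short, long):
--         '''Walk from the front of each sentence as long as they are the same word.
--         Return the words leftover once there is a difference'''
--         for i in range(len(short)):
--             if short[i] != long[i]:
--                 return short[i:]
--
--     def check_back(short, long):
--         '''Walk backwards as long as each sentence has the same word.
--         If they all match, return True.'''
--         if not(short):
--             return True
--         diff = len(long) - len(short)
--         for i in range(len(short)-1,-1,-1):
--             if short[i] != long[i+diff]: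
--                 return False
--         return True
--
--     if not(sentence1) or not(sentence2):
--         return True
--     # Break each sentence into words
--     s1 = sentence1.split()
--     s2 = sentence2.split()
--     if s1 == s2:
--         return True
--     elif len(s1) == len(s2):
--         return False
--     # Set the short/long sentences.
--     if len(s1) > len(s2):
--         short = s2
--         long = s1
--     else:
--         short = s1
--         long = s2
--     # Check validity
--     remainder = check_front(short, long)
--     return check_back(remainder, long)
-- ===== SOURCE B (Python) =====
-- def areSentencesSimilar(sentence1: str, sentence2: str) -> bool:
--     s1 = sentence1.split()
--     s2 = sentence2.split()
--     sh, lo = (s1, s2) if len(s1) <= len(s2) else (s2, s1)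
--     k, L = len(sh), len(lo)
--     return any(sh[:t] == lo[:t] and sh[t:] == lo[L - (k - t):]
--                for t in range(k + 1))
-- ===== Notes on version B (the rewrite author's own statement) =====
-- stated objective: alternative
-- what changed: Replaced the front-then-back two-pointer walk (with short/long split, remainder list and equal-length branch) by an existential search over all split points t: the shorter word list is cut into prefix sh[:t] and suffix sh[t:] and each cut is compared directly against the ends of the longer list.
import Mathlib
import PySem

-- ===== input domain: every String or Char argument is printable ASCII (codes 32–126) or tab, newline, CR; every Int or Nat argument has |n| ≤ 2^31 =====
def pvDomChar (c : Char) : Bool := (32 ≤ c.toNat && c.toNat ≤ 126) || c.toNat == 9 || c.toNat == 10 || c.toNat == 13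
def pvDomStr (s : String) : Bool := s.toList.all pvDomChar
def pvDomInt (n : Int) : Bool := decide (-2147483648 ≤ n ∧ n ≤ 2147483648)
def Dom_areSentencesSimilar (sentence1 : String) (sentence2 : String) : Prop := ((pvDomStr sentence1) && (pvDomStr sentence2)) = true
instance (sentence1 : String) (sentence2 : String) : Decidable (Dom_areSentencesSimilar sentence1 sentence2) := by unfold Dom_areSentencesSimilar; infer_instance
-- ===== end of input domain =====

-- B replaces A's front/back two-pointer walk (short/long split, remainder list,
-- equal-length branch) by a brute-force existential search over all split points
-- of the shorter word list; objective: alternative (same answer, O(n^2) vs O(n)).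

-- ===== PORT A =====
-- check_front: walk from the front while words match; return leftover (None if all of short matched)
def pvCheckFront (short long : List String) (i : Nat) : Option (List String) :=
  if _h : i < short.length then
    if short.getD i "" ≠ long.getD i "" then some (short.drop i)
    else pvCheckFront short long (i + 1)
  else none
termination_by short.length - i

-- check_back's loop: for i in range(len(short)-1,-1,-1), compare short[i] with long[i+diff]
def pvCheckBackLoop (short long : List String) (diff : Nat) : Nat → Bool
  | 0 => true
  | k + 1 =>
    if short.getD k "" ≠ long.getD (k + diff) "" then false
    else pvCheckBackLoop short long diff k

-- check_back: None or empty remainder → True (Python `if not(short)`)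
def pvCheckBack (rem : Option (List String)) (long : List String) : Bool :=
  match rem with
  | none => true
  | some short =>
    if short.isEmpty then true
    else pvCheckBackLoop short long (long.length - short.length) short.length

def areSentencesSimilar (sentence1 : String) (sentence2 : String) : Bool :=
  if sentence1 == "" || sentence2 == "" then true
  else
    let s1 := PySem.Str.split₀ sentence1
    let s2 := PySem.Str.split₀ sentence2
    if s1 == s2 then true
    else if s1.length == s2.length then false
    else
      let sl := if s1.length > s2.length then (s2, s1) else (s1, s2)
      pvCheckBack (pvCheckFront sl.1 sl.2 0) sl.2

-- ===== PORT B =====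
-- any(sh[:t] == lo[:t] and sh[t:] == lo[L-(k-t):] for t in range(k+1));
-- the slice bounds are all non-negative and within range, so sh[:t] = take t,
-- sh[t:] = drop t, lo[L-(k-t):] = drop (L-(k-t)) exactly.
def areSentencesSimilar_alt (sentence1 : String) (sentence2 : String) : Bool :=
  let s1 := PySem.Str.split₀ sentence1
  let s2 := PySem.Str.split₀ sentence2
  let sl := if s1.length ≤ s2.length then (s1, s2) else (s2, s1)
  let sh := sl.1
  let lo := sl.2
  let k := sh.length
  let L := lo.length
  (List.range (k + 1)).any (fun t =>
    sh.take t == lo.take t && sh.drop t == lo.drop (L - (k - t)))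

-- ===== PRECONDITION & SPEC =====
def Spec_areSentencesSimilar (sentence1 : String) (sentence2 : String) (out : Bool) : Prop := out = areSentencesSimilar_alt sentence1 sentence2
instance (sentence1 : String) (sentence2 : String) (out : Bool) : Decidable (Spec_areSentencesSimilar sentence1 sentence2 out) := by unfold Spec_areSentencesSimilar; infer_instance

-- ===== CLAIM (what is proved, stated in full; the proofs are below) =====
def Claim_equal_areSentencesSimilar : Prop := ∀ (sentence1 : String) (sentence2 : String), Dom_areSentencesSimilar sentence1 sentence2 → Spec_areSentencesSimilar sentence1 sentence2 (areSentencesSimilar sentence1 sentence2)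

-- ===== LEMMAS AND PROOFS =====

-- length of the common prefix of two word lists (proof-side characterisation)
def cpLen : List String → List String → Nat
  | a :: as, b :: bs => if a = b then cpLen as bs + 1 else 0
  | _, _ => 0

theorem cpLen_le_left (a b : List String) : cpLen a b ≤ a.length := by
  induction a generalizing b with
  | nil => simp [cpLen]
  | cons x xs ih =>
    cases b with
    | nil => simp [cpLen]
    | cons y ys =>
      simp only [cpLen, List.length_cons]
      split_ifs
      · exact Nat.succ_le_succ (ih ys)
      · omega

theorem cpLen_le_right (a b : List String) : cpLen a b ≤ b.length := by
  induction a generalizing b with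
  | nil => simp [cpLen]
  | cons x xs ih =>
    cases b with
    | nil => simp [cpLen]
    | cons y ys =>
      simp only [cpLen, List.length_cons]
      split_ifs
      · exact Nat.succ_le_succ (ih ys)
      · omega

theorem cpLen_comm (a b : List String) : cpLen a b = cpLen b a := by
  induction a generalizing b with
  | nil => cases b <;> simp [cpLen]
  | cons x xs ih =>
    cases b with
    | nil => simp [cpLen]
    | cons y ys =>
      simp only [cpLen]
      by_cases h : x = y
      · rw [if_pos h, if_pos h.symm, ih ys]
      · rw [if_neg h, if_neg (fun hc => h hc.symm)]

theorem cpLen_getD (a b : List String) (k : Nat) (hk : k < cpLen a b) :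
    a.getD k "" = b.getD k "" := by
  induction a generalizing b k with
  | nil => simp [cpLen] at hk
  | cons x xs ih =>
    cases b with
    | nil => simp [cpLen] at hk
    | cons y ys =>
      simp only [cpLen] at hk
      split_ifs at hk with h
      · cases k with
        | zero => simpa using h
        | succ k' => simpa using ih ys k' (by omega)
      · omega

theorem cpLen_ne (a b : List String) (h1 : cpLen a b < a.length) (h2 : cpLen a b < b.length) :
    a.getD (cpLen a b) "" ≠ b.getD (cpLen a b) "" := by
  induction a generalizing b with
  | nil => simp at h1
  | cons x xs ih =>
    cases b with
    | nil => simp at h2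
    | cons y ys =>
      simp only [cpLen, List.length_cons] at h1 h2 ⊢
      by_cases h : x = y
      · rw [if_pos h] at h1 h2 ⊢
        simpa using ih ys (by omega) (by omega)
      · rw [if_neg h]
        simpa using h

theorem cpLen_refl (a : List String) : cpLen a a = a.length := by
  induction a with
  | nil => simp [cpLen]
  | cons x xs ih => simp [cpLen, ih]

theorem eq_of_cpLen_full (a b : List String) (hlen : a.length = b.length)
    (h : cpLen a b = a.length) : a = b := by
  induction a generalizing b with
  | nil => cases b <;> simp_all
  | cons x xs ih =>
    cases b with
    | nil => simp at hlen
    | cons y ys =>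
      simp only [cpLen, List.length_cons] at h hlen
      split_ifs at h with hxy
      · rw [hxy, ih ys (by omega) (by omega)]

theorem getD_reverse (l : List String) (j : Nat) (h : j < l.length) :
    l.reverse.getD j "" = l.getD (l.length - 1 - j) "" := by
  rw [List.getD_eq_getElem _ _ (by simpa using h),
      List.getD_eq_getElem _ _ (by omega), List.getElem_reverse]

-- take t of both lists agree exactly when t is within the common prefix
theorem take_eq_iff (a b : List String) (t : Nat) (hta : t ≤ a.length) (htb : t ≤ b.length) :
    a.take t = b.take t ↔ t ≤ cpLen a b := by
  induction t generalizing a b with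
  | zero => simp
  | succ n ih =>
    cases a with
    | nil => simp at hta
    | cons x xs =>
      cases b with
      | nil => simp at htb
      | cons y ys =>
        simp only [List.take_succ_cons, cpLen]
        by_cases hxy : x = y
        · subst hxy
          rw [if_pos rfl]
          simp only [List.cons.injEq, true_and]
          rw [ih xs ys (by simpa using hta) (by simpa using htb)]
          omega
        · rw [if_neg hxy]
          constructor
          · intro h
            injection h with h1 _
            exact absurd h1 hxy
          · intro h
            exact absurd h (by omega)

theorem take_eq_of_le_cpLen (a b : List String) (t : Nat) (ht : t ≤ cpLen a b) :
    a.take t = b.take t :=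
  (take_eq_iff a b t (le_trans ht (cpLen_le_left a b))
    (le_trans ht (cpLen_le_right a b))).mpr ht

theorem le_cpLen_of_take_eq (a b : List String) (t : Nat)
    (hta : t ≤ a.length) (htb : t ≤ b.length) (h : a.take t = b.take t) :
    t ≤ cpLen a b :=
  (take_eq_iff a b t hta htb).mp h

-- the B-side any over split points equals the prefix+suffix criterion
theorem any_split_eq (sh lo : List String) (hsl : sh.length ≤ lo.length) :
    ((List.range (sh.length + 1)).any (fun t =>
        sh.take t == lo.take t && sh.drop t == lo.drop (lo.length - (sh.length - t)))) =
    decide (cpLen sh lo + cpLen sh.reverse lo.reverse ≥ sh.length) := by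
  set k := sh.length with hk
  set L := lo.length with hL
  have hdropiff : ∀ t, t ≤ k →
      (sh.drop t = lo.drop (L - (k - t)) ↔ k - t ≤ cpLen sh.reverse lo.reverse) := by
    intro t ht
    have hrev : sh.drop t = lo.drop (L - (k - t)) ↔
        (sh.drop t).reverse = (lo.drop (L - (k - t))).reverse := by
      constructor
      · intro h; rw [h]
      · intro h; simpa using congrArg List.reverse h
    rw [hrev, List.reverse_drop, List.reverse_drop, ← hk, ← hL]
    have e1 : k - t = sh.length - t := by omega
    have e2 : L - (L - (k - t)) = k - t := by omega
    rw [← e1, e2]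
    constructor
    · intro h
      exact le_cpLen_of_take_eq _ _ _ (by simp; omega) (by simp; omega) h
    · intro h
      exact take_eq_of_le_cpLen _ _ _ h
  have h1 := cpLen_le_left sh lo
  have h2 := cpLen_le_right sh lo
  by_cases hcrit : cpLen sh lo + cpLen sh.reverse lo.reverse ≥ k
  · rw [decide_eq_true hcrit]
    rw [List.any_eq_true]
    refine ⟨cpLen sh lo, by simp [List.mem_range]; omega, ?_⟩
    rw [Bool.and_eq_true, beq_iff_eq, beq_iff_eq]
    exact ⟨take_eq_of_le_cpLen sh lo _ (le_refl _),
           (hdropiff (cpLen sh lo) (by omega)).mpr (by omega)⟩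
  · rw [decide_eq_false hcrit]
    rw [List.any_eq_false]
    intro t htmem
    have ht : t ≤ k := by simpa [List.mem_range, Nat.lt_succ_iff] using htmem
    intro hboth
    rw [Bool.and_eq_true, beq_iff_eq, beq_iff_eq] at hboth
    obtain ⟨hpre, hsuf⟩ := hboth
    have hp := le_cpLen_of_take_eq sh lo t (by omega) (by omega) hpre
    have hs := (hdropiff t ht).mp hsuf
    omega

-- ----- A-side helpers -----

theorem pvCheckFront_eq (short long : List String) (hlen : short.length ≤ long.length)
    (i : Nat) (hi : i ≤ cpLen short long) :
    pvCheckFront short long i =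
      if cpLen short long < short.length then some (short.drop (cpLen short long)) else none := by
  by_cases h : i < cpLen short long
  · rw [pvCheckFront]
    have h1 := cpLen_le_left short long
    rw [dif_pos (by omega), if_neg (by simpa using cpLen_getD short long i h)]
    exact pvCheckFront_eq short long hlen (i + 1) (by omega)
  · have hi' : i = cpLen short long := by omega
    subst hi'
    rw [pvCheckFront]
    by_cases hcp : cpLen short long < short.length
    · rw [dif_pos hcp, if_pos (cpLen_ne short long hcp (by omega)), if_pos hcp]
    · rw [dif_neg (by omega), if_neg hcp]
termination_by cpLen short long - i

theorem pvCheckBackLoop_eq (short long : List String) (diff k : Nat) :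
    pvCheckBackLoop short long diff k =
      decide (∀ t < k, short.getD t "" = long.getD (t + diff) "") := by
  induction k with
  | zero => simp [pvCheckBackLoop]
  | succ k' ih =>
    rw [pvCheckBackLoop]
    by_cases h : short.getD k' "" = long.getD (k' + diff) ""
    · rw [if_neg (by simpa using h), ih]
      by_cases hall : ∀ t < k', short.getD t "" = long.getD (t + diff) ""
      · rw [decide_eq_true hall, decide_eq_true]
        intro t ht
        rcases Nat.lt_succ_iff_lt_or_eq.mp ht with ht' | ht'
        · exact hall t ht'
        · subst ht'; exact h
      · rw [decide_eq_false hall, decide_eq_false]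
        intro hall'
        exact hall fun t ht => hall' t (by omega)
    · rw [if_pos (by simpa using h), eq_comm, decide_eq_false]
      intro hall
      exact h (hall k' (Nat.lt_succ_self k'))

theorem getD_drop (l : List String) (n t : Nat) (h : n + t < l.length) :
    (l.drop n).getD t "" = l.getD (n + t) "" := by
  rw [List.getD_eq_getElem _ _ (by simp; omega), List.getD_eq_getElem _ _ h,
      List.getElem_drop]

-- the A-side tail check equals "common suffix covers the remainder"
theorem remainder_check (short long : List String) (hlen : short.length < long.length)
    (hcp : cpLen short long < short.length) :
    (decide (∀ t < short.length - cpLen short long,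
        (short.drop (cpLen short long)).getD t "" =
          long.getD (t + (long.length - (short.length - cpLen short long))) "")) =
    decide (cpLen short long + cpLen short.reverse long.reverse ≥ short.length) := by
  set cp := cpLen short long with hcpdef
  set L := short.length - cp with hL
  have hLpos : 0 < L := by omega
  have hLs : L ≤ short.length := by omega
  have hLl : L < long.length := by omega
  have key : (∀ t < L, (short.drop cp).getD t "" = long.getD (t + (long.length - L)) "") ↔
      cpLen short.reverse long.reverse ≥ L := by
    constructor
    · intro hall
      by_contra hlt
      rw [Nat.not_le] at hlt
      have hu1 : cpLen short.reverse long.reverse < short.length := by omega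
      have hu2 : cpLen short.reverse long.reverse < long.length := by omega
      have hne := cpLen_ne short.reverse long.reverse (by simpa using hu1) (by simpa using hu2)
      rw [getD_reverse short _ hu1, getD_reverse long _ hu2] at hne
      have ht := hall (L - 1 - cpLen short.reverse long.reverse) (by omega)
      rw [getD_drop short cp _ (by omega)] at ht
      have e1 : cp + (L - 1 - cpLen short.reverse long.reverse) =
          short.length - 1 - cpLen short.reverse long.reverse := by omega
      have e2 : L - 1 - cpLen short.reverse long.reverse + (long.length - L) =
          long.length - 1 - cpLen short.reverse long.reverse := by omega
      rw [e1, e2] at ht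
      exact hne ht
    · intro hcs t ht
      have := cpLen_getD short.reverse long.reverse (L - 1 - t) (by omega)
      rw [getD_reverse short (L - 1 - t) (by omega), getD_reverse long (L - 1 - t) (by omega)]
        at this
      rw [getD_drop short cp t (by omega)]
      have e1 : short.length - 1 - (L - 1 - t) = cp + t := by omega
      have e2 : long.length - 1 - (L - 1 - t) = t + (long.length - L) := by omega
      rw [e1, e2] at this
      exact this
  by_cases h : cpLen short.reverse long.reverse ≥ L
  · rw [decide_eq_true (key.mpr h), decide_eq_true (by omega)]
  · rw [decide_eq_false (fun hh => h (key.mp hh)), decide_eq_false (by omega)]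

-- A's core for strictly shorter `short`
theorem a_core (short long : List String) (hlen : short.length < long.length) :
    pvCheckBack (pvCheckFront short long 0) long =
      decide (cpLen short long + cpLen short.reverse long.reverse ≥ short.length) := by
  rw [pvCheckFront_eq short long (by omega) 0 (Nat.zero_le _)]
  by_cases hcp : cpLen short long < short.length
  · rw [if_pos hcp]
    simp only [pvCheckBack]
    rw [if_neg (by simp [List.isEmpty_iff, List.drop_eq_nil_iff]; omega)]
    rw [pvCheckBackLoop_eq]
    have hdl : (short.drop (cpLen short long)).length = short.length - cpLen short long := by
      simp
    rw [hdl]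
    exact remainder_check short long hlen hcp
  · rw [if_neg hcp]
    simp only [pvCheckBack]
    rw [eq_comm, decide_eq_true]
    omega

-- equal-length unequal lists fail the criterion
theorem eq_len_ne (s1 s2 : List String) (hlen : s1.length = s2.length) (hne : s1 ≠ s2) :
    ¬ (cpLen s1 s2 + cpLen s1.reverse s2.reverse ≥ s1.length) := by
  intro hge
  have h1 := cpLen_le_left s1 s2
  have hcp : cpLen s1 s2 < s1.length := by
    rcases Nat.lt_or_ge (cpLen s1 s2) s1.length with h | h
    · exact h
    · exact absurd (eq_of_cpLen_full s1 s2 hlen (by omega)) hne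
  have hne' := cpLen_ne s1 s2 hcp (by omega)
  have ht : s1.length - 1 - cpLen s1 s2 < cpLen s1.reverse s2.reverse := by omega
  have := cpLen_getD s1.reverse s2.reverse _ ht
  rw [getD_reverse s1 _ (by omega), getD_reverse s2 _ (by omega)] at this
  have e1 : s1.length - 1 - (s1.length - 1 - cpLen s1 s2) = cpLen s1 s2 := by omega
  have e2 : s2.length - 1 - (s1.length - 1 - cpLen s1 s2) = cpLen s1 s2 := by omega
  rw [e1, e2] at this
  exact hne' this

-- B's core (swap then any over splits) equals the prefix+suffix criterion with the min length
theorem alt_core (s1 s2 : List String) :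
    (let sl := if s1.length ≤ s2.length then (s1, s2) else (s2, s1)
     (List.range (sl.1.length + 1)).any (fun t =>
        sl.1.take t == sl.2.take t &&
        sl.1.drop t == sl.2.drop (sl.2.length - (sl.1.length - t)))) =
    decide (cpLen s1 s2 + cpLen s1.reverse s2.reverse ≥ min s1.length s2.length) := by
  by_cases hle : s1.length ≤ s2.length
  · simp only [if_pos hle]
    rw [any_split_eq s1 s2 hle]
    congr 1
    simp only [eq_iff_iff]
    omega
  · simp only [if_neg hle]
    rw [any_split_eq s2 s1 (by omega), cpLen_comm s2 s1, cpLen_comm s2.reverse s1.reverse]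
    congr 1
    simp only [eq_iff_iff]
    omega

-- the two programs agree on any pair of input strings
theorem full_eq (sentence1 sentence2 : String) :
    areSentencesSimilar sentence1 sentence2 = areSentencesSimilar_alt sentence1 sentence2 := by
  unfold areSentencesSimilar areSentencesSimilar_alt
  simp only []
  set s1 := PySem.Str.split₀ sentence1 with hs1
  set s2 := PySem.Str.split₀ sentence2 with hs2
  have hB : (let sl := if s1.length ≤ s2.length then (s1, s2) else (s2, s1)
      (List.range (sl.1.length + 1)).any (fun t =>
        sl.1.take t == sl.2.take t &&
        sl.1.drop t == sl.2.drop (sl.2.length - (sl.1.length - t)))) =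
      decide (cpLen s1 s2 + cpLen s1.reverse s2.reverse ≥ min s1.length s2.length) :=
    alt_core s1 s2
  by_cases hemp : (sentence1 == "" || sentence2 == "") = true
  · rw [if_pos hemp]
    -- one of the strings is empty, so its word list is [] and the criterion holds trivially
    have hnil : s1 = [] ∨ s2 = [] := by
      rcases Bool.or_eq_true_iff.mp hemp with h | h
      · left; rw [hs1, eq_of_beq h]; decide
      · right; rw [hs2, eq_of_beq h]; decide
    rw [hB, eq_comm, decide_eq_true]
    rcases hnil with h | h <;> simp [h]
  · rw [if_neg hemp, hB]
    by_cases heq : s1 = s2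
    · rw [if_pos (by simp [heq]), eq_comm, decide_eq_true]
      rw [heq, cpLen_refl]
      omega
    · rw [if_neg (by simpa using heq)]
      by_cases hlen : s1.length = s2.length
      · rw [if_pos (by simpa using hlen), eq_comm, decide_eq_false]
        have := eq_len_ne s1 s2 hlen heq
        omega
      · rw [if_neg (by simpa using hlen)]
        by_cases hgt : s1.length > s2.length
        · rw [if_pos (by simpa using hgt)]
          rw [a_core s2 s1 hgt, cpLen_comm s2 s1, cpLen_comm s2.reverse s1.reverse]
          have h1 := cpLen_le_left s1 s2
          have h2 := cpLen_le_right s1 s2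
          by_cases h : cpLen s1 s2 + cpLen s1.reverse s2.reverse ≥ s2.length
          · rw [decide_eq_true h, decide_eq_true (by omega)]
          · rw [decide_eq_false h, decide_eq_false (by omega)]
        · rw [if_neg (by simpa using hgt)]
          rw [a_core s1 s2 (by omega)]
          have h1 := cpLen_le_left s1 s2
          have h2 := cpLen_le_right s1 s2
          by_cases h : cpLen s1 s2 + cpLen s1.reverse s2.reverse ≥ s1.length
          · rw [decide_eq_true h, decide_eq_true (by omega)]
          · rw [decide_eq_false h, decide_eq_false (by omega)]

-- ===== VERDICT (by name: the statement is the Claim_ definition above) =====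
theorem areSentencesSimilar_spec : Claim_equal_areSentencesSimilar := by
  intro sentence1 sentence2 _
  unfold Spec_areSentencesSimilar
  exact full_eq sentence1 sentence2
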